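-- pv_equiv track=rewrite | github.com/amazinglySK/AOC | AOC_2023/problem-13/part2.py | part2
-- ===== SOURCE A (Python) =====
-- def calc_diff(l1, l2) :
--     t = 0
--     for i, j in zip(l1, l2) :
--         if i != j : t += 1
--     return t
--
-- def find_mirror_with_smudge(l) :
--     # Horizontal
--     for i in range(len(l) - 1) :
--         diff = calc_diff(l[i], l[i+1])
--         smudge_done = False
--         if diff == 1 : smudge_done = True
--         if diff <= 1:
--             l1 = i + 2
--             l2 = i + i + 1 - l1
--             while 0 <= l2 and l1 < len(l):
--                 diff = calc_diff(l[l1], l[l2])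
--                 if diff > 1 or (diff == 1 and smudge_done): break
--                 elif diff == 1 : smudge_done = True
--                 l1 += 1
--                 l2 -= 1
--             else :
--                 if not smudge_done : continue
--                 return "row", i + 1
--
--     # Vertical
--     for i in range(len(l[0]) - 1) :
--         col = [x[i] for x in l]
--         col2 = [x[i+1] for x in l]
--         diff = calc_diff(col, col2)
--         smudge_done = False
--         if diff == 1 : smudge_done = True
--         if diff <= 1:
--             c1 = i + 2
--             c2 = i + i + 1 - c1
--             while 0 <= c2 and c1 < len(l[0]):
--                 col = [x[c1] for x in l]
--                 col2 = [x[c2] for x in l]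
--                 diff = calc_diff(col, col2)
--                 if diff > 1 or (diff == 1 and smudge_done): break
--                 elif diff == 1: smudge_done = True
--                 c1 += 1
--                 c2 -= 1
--             else :
--                 if not smudge_done : continue
--                 return "col", i + 1
--
-- def part2(patterns) :
--
--     s2 = 0
--     for p in patterns :
--         lines = p.split('\n')
--         t, n = find_mirror_with_smudge(lines)
--         if t== "row" : s2 += n*100
--         if t== "col" : s2 += n
--
--     return s2
-- ===== SOURCE B (Python) =====
-- def count_mismatch(l1, l2):
--     return sum(a != b for a, b in zip(l1, l2))
--
--
-- def pair_defects(n, d):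
--     """defect[m] = total mismatch count of ALL index pairs r<s<n that are mirror
--     images about split m|m+1 (i.e. r+s == 2m+1), accumulated pair-by-pair."""
--     defect = [0] * (n - 1)
--     for r in range(n):
--         for s in range(r + 1, n):
--             if (r + s) % 2 == 1:
--                 defect[(r + s - 1) // 2] += d(r, s)
--     return defect
--
--
-- def first_one(defect):
--     for i, v in enumerate(defect):
--         if v == 1:
--             return i + 1
--     return None
--
--
-- def part2(patterns):
--     total = 0
--     for p in patterns:
--         g = p.split('\n')
--         score = first_one(pair_defects(len(g), lambda r, s: count_mismatch(g[r], g[s])))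
--         if score is not None:
--             total += 100 * score
--         else:
--             w = len(g[0])
--             total += first_one(pair_defects(w, lambda c1, c2: sum(x[c1] != x[c2] for x in g)))
--     return total
-- ===== Notes on version B (the rewrite author's own statement) =====
-- stated objective: alternative
-- what changed: Instead of expanding outward from each candidate split with a smudge_done flag and early breaks, B iterates once over all index PAIRS (r<s of rows, then of columns, with no transpose/column extraction step order like A's), accumulating each pair's mismatch count into a defect table indexed by the split (r+s-1)//2 that mirrors them, then scans the table for the first entry equal to 1.
-- outside the precondition, e.g. on part2(['#.#.\n#####\n##']): A returns 1, B raises IndexError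
import Mathlib
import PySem

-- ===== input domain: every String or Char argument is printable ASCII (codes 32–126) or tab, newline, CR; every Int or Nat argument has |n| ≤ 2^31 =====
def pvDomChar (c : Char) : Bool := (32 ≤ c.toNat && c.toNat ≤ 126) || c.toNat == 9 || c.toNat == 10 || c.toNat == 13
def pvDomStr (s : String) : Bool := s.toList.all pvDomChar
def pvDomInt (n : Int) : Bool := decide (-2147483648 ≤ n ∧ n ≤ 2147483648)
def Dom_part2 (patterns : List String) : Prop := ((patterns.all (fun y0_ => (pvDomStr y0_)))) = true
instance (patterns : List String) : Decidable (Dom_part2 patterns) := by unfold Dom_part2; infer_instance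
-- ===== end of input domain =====

-- B replaces A's per-split outward expansion (smudge_done flag, early breaks, column
-- extraction) by one sweep over all index PAIRS that accumulates each pair's mismatch
-- count into a defect table indexed by the split mirroring the pair, then scans that
-- table for the first entry equal to 1 (objective: alternative).

-- ===== PORT A =====
-- calc_diff over the zipped pair lists (Python zip truncates to the shorter argument)
def calcDiff (l1 l2 : List Char) : Nat :=
  (l1.zip l2).foldl (fun t p => if p.1 ≠ p.2 then t + 1 else t) 0

-- the inner 'while 0 <= l2 and l1 < len: … else: …' loop of A, shared verbatim by the
-- horizontal and vertical passes via the accessor 'get' (row i, resp. column i).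
-- Result: none = break, some s = while-loop exhausted with final smudge_done = s.
-- Indices handed to 'get' are nonnegative here (l2 by the guard, l1 starts ≥ 2 and grows),
-- so the .toNat inside the accessors below is exact.
def aWhile (get : Int → List Char) (n : Nat) (l1 l2 : Int) (smudge : Bool) : Option Bool :=
  if _h : 0 ≤ l2 ∧ l1 < (n : Int) then
    let diff := calcDiff (get l1) (get l2)
    if 1 < diff ∨ (diff = 1 ∧ smudge = true) then none
    else aWhile get n (l1 + 1) (l2 - 1) (decide (diff = 1) || smudge)
  else some smudge
termination_by (l2 + 1).toNat
decreasing_by omega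

-- one of A's two 'for i in range(…)' search loops (they are literally the same code up to
-- the accessor and the bound); returns i+1 of the first accepted split.
def aSearch (get : Int → List Char) (n : Nat) : List Nat → Option Nat
  | [] => none
  | i :: rest =>
    let diff := calcDiff (get (i : Int)) (get ((i : Int) + 1))
    let smudge := decide (diff = 1)
    if diff ≤ 1 then
      match aWhile get n ((i : Int) + 2) ((i : Int) - 1) smudge with
      | some s => if s then some (i + 1) else aSearch get n rest
      | none => aSearch get n rest
    else aSearch get n rest

-- find_mirror_with_smudge; Python returns None implicitly when no split is found
def findMirror (rows : List String) : Option (String × Int) :=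
  match aSearch (fun j => (rows.getD j.toNat "").toList) rows.length
      (List.range (rows.length - 1)) with
  | some m => some ("row", (m : Int))
  | none =>
    let w := (rows.headD "").length   -- len(l[0]); split('\n') never returns an empty list
    match aSearch (fun j => rows.map (fun x => x.toList.getD j.toNat ' ')) w
        (List.range (w - 1)) with
    | some m => some ("col", (m : Int))
    | none => none

def part2 (patterns : List String) : Int :=
  patterns.foldl (fun s2 p =>
    match findMirror (((PySem.Str.split? p "\n").getD [])) with
    | some (t, n) =>
      let s2' := if t = "row" then s2 + n * 100 else s2
      if t = "col" then s2' + n else s2'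
    | none => s2                      -- Python raises TypeError here; excluded by Pre_
  ) 0

-- ===== PORT B =====
-- count_mismatch(l1, l2)
def countMismatch (l1 l2 : List Char) : Nat :=
  ((l1.zip l2).map (fun p => if p.1 ≠ p.2 then 1 else 0)).sum

-- pair_defects(n, d): defect[m] accumulates d(r, s) over every pair r < s < n with
-- r + s = 2m + 1, visited pair by pair (r ascending, then s)
def pairDefects (n : Nat) (d : Nat → Nat → Nat) : List Nat :=
  (List.range n).foldl (fun arr r =>
    (List.range' (r + 1) (n - (r + 1))).foldl (fun arr s =>
      if (r + s) % 2 = 1 then arr.modify ((r + s - 1) / 2) (· + d r s) else arr) arr)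
    (List.replicate (n - 1) 0)

-- first_one: 'for i, v in enumerate(defect): if v == 1: return i + 1' with i+1 carried
-- as the accumulator c (c = index of the head cell + 1)
def firstOne : List Nat → Nat → Option Nat
  | [], _ => none
  | v :: rest, c => if v = 1 then some (c + 1) else firstOne rest (c + 1)

def part2_alt (patterns : List String) : Int :=
  patterns.foldl (fun total p =>
    let g := ((PySem.Str.split? p "\n").getD []).map String.toList
    match firstOne (pairDefects g.length
        (fun r s => countMismatch (g.getD r []) (g.getD s []))) 0 with
    | some sc => total + 100 * (sc : Int)
    | none =>
      let w := (g.headD []).length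
      match firstOne (pairDefects w
          (fun c1 c2 => (g.map (fun x => if x.getD c1 ' ' ≠ x.getD c2 ' ' then 1 else 0)).sum)) 0 with
      | some sc => total + (sc : Int)
      | none => total                 -- Python raises TypeError here; excluded by Pre_
  ) 0

-- ===== PRECONDITION & SPEC =====
-- spec-level helpers (used only by Pre_ and the proofs, by neither port):
def calcDiffB (l1 l2 : List Char) : Nat :=
  ((l1.zip l2).map (fun p => if p.1 ≠ p.2 then 1 else 0)).sum

-- total mismatch count over every mirrored pair around split i | i+1
def mirrorDefects (seqs : List (List Char)) (i : Nat) : Nat :=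
  ((List.range (min (i + 1) (seqs.length - 1 - i))).map
    (fun k => calcDiffB (seqs.getD (i - k) []) (seqs.getD (i + 1 + k) []))).sum

-- the columns of the grid, each padded with ' ' where a row is shorter than row 0
-- (for the rectangular grids Pre_'s second disjunct demands this is the exact transpose)
def colsOf (rows : List (List Char)) : List (List Char) :=
  (List.range (rows.headD []).length).map (fun j => rows.map (fun x => x.getD j ' '))

-- Pre_ excludes (a) patterns with no split of total defect exactly 1 in the pass that
-- reaches it — there Python A's tuple unpack of None raises TypeError and Python B adds
-- None — and (b) ragged patterns (lines of unequal length) whose row pass finds no split: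
-- there A's column pass indexes rows beyond their length and either raises IndexError or
-- returns a scan-order-dependent accidental value, while B raises IndexError.
def Pre_part2 (patterns : List String) : Prop :=
  ∀ p ∈ patterns,
    (let rows := ((PySem.Str.split? p "\n").getD []).map String.toList
     ((List.range (rows.length - 1)).any (fun i => mirrorDefects rows i == 1)
      || ((rows.all (fun r => r.length == (rows.headD []).length))
          && (List.range ((colsOf rows).length - 1)).any
               (fun i => mirrorDefects (colsOf rows) i == 1))) = true)
instance (patterns : List String) : Decidable (Pre_part2 patterns) := by
  unfold Pre_part2; infer_instance

def pvWitness_part2 : List String := ["#.\n#.\n##"]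

def Spec_part2 (patterns : List String) (out : Int) : Prop := out = part2_alt patterns
instance (patterns : List String) (out : Int) : Decidable (Spec_part2 patterns out) := by
  unfold Spec_part2; infer_instance

-- ===== CLAIM (what is proved, stated in full; the proofs are below) =====
def Claim_equal_part2 : Prop :=
  ∀ (patterns : List String), Dom_part2 patterns → Pre_part2 patterns →
    Spec_part2 patterns (part2 patterns)

-- ===== LEMMAS AND PROOFS =====

-- the first split (as i+1) whose total defect count is exactly 1: the common shape both
-- ports are reduced to
def findSplit (seqs : List (List Char)) : Option Nat :=
  ((List.range (seqs.length - 1)).find? (fun i => mirrorDefects seqs i == 1)).map (· + 1)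

-- total mismatch count over the pairs the while loop of A still has in front of it
def pairSum (get : Int → List Char) (n : Nat) (l1 l2 : Int) : Nat :=
  if _h : 0 ≤ l2 ∧ l1 < (n : Int) then
    calcDiff (get l1) (get l2) + pairSum get n (l1 + 1) (l2 - 1)
  else 0
termination_by (l2 + 1).toNat
decreasing_by omega

lemma foldl_count (zs : List (Char × Char)) (t : Nat) :
    zs.foldl (fun t p => if p.1 ≠ p.2 then t + 1 else t) t
      = t + ((zs.map (fun p => if p.1 ≠ p.2 then 1 else 0)).sum) := by
  induction zs generalizing t with
  | nil => simp
  | cons z zs ih =>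
    simp only [List.foldl_cons, List.map_cons, List.sum_cons, ih]
    split <;> omega

lemma calcDiffB_eq (l1 l2 : List Char) : calcDiffB l1 l2 = calcDiff l1 l2 := by
  unfold calcDiffB calcDiff
  rw [foldl_count]
  omega

lemma calcDiffB_comm (l1 l2 : List Char) : calcDiffB l1 l2 = calcDiffB l2 l1 := by
  induction l1 generalizing l2 with
  | nil => cases l2 <;> simp [calcDiffB]
  | cons a l1 ih =>
    cases l2 with
    | nil => simp [calcDiffB]
    | cons b l2 =>
      simp only [calcDiffB, List.zip_cons_cons, List.map_cons, List.sum_cons] at ih ⊢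
      rw [ih]
      by_cases hab : a = b
      · simp [hab]
      · simp [hab, Ne.symm hab]

lemma calcDiff_comm (l1 l2 : List Char) : calcDiff l1 l2 = calcDiff l2 l1 := by
  rw [← calcDiffB_eq, ← calcDiffB_eq, calcDiffB_comm]

lemma aWhile_some_true (get : Int → List Char) (n : Nat) (l1 l2 : Int) (smudge : Bool) :
    (aWhile get n l1 l2 smudge = some true) ↔
      ((if smudge then 1 else 0) + pairSum get n l1 l2 = 1) := by
  fun_induction aWhile get n l1 l2 smudge with
  | case1 l1 l2 smudge hg diff hbr =>
    rw [pairSum.eq_def, dif_pos hg]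
    have hd : diff = calcDiff (get l1) (get l2) := rfl
    rw [hd] at hbr
    constructor
    · intro hc; exact absurd hc (by simp)
    · intro hc
      exfalso
      rcases hbr with h1 | ⟨h1, h2⟩
      · split_ifs at hc <;> omega
      · subst h2
        rw [if_pos rfl] at hc
        omega
  | case2 l1 l2 smudge hg diff hnb ih =>
    rw [pairSum.eq_def, dif_pos hg, ih]
    have hd : diff = calcDiff (get l1) (get l2) := rfl
    rw [hd] at hnb
    by_cases h1 : calcDiff (get l1) (get l2) = 1
    · have hs : smudge = false := by
        rcases Bool.eq_false_or_eq_true smudge with h | h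
        · exact absurd (Or.inr ⟨h1, h⟩) hnb
        · exact h
      subst hs
      simp only [hd, h1]
      simp
    · have h0 : calcDiff (get l1) (get l2) = 0 := by
        have : ¬ 1 < calcDiff (get l1) (get l2) := fun hlt => hnb (Or.inl hlt)
        omega
      cases smudge <;> simp only [hd, h0] <;> simp
  | case3 l1 l2 smudge hg =>
    rw [pairSum.eq_def, dif_neg hg]
    cases smudge <;> simp

lemma pairSum_congr (get get' : Int → List Char) (n : Nat) :
    ∀ l1 l2 : Int, l2 < l1 →
      (∀ j : Int, 0 ≤ j → j < (n : Int) → get j = get' j) →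
      pairSum get n l1 l2 = pairSum get' n l1 l2 := by
  intro l1 l2
  generalize hfu : (l2 + 1).toNat = fu
  induction fu using Nat.strong_induction_on generalizing l1 l2 with
  | _ fu ih =>
    intro hlt hget
    rw [pairSum.eq_def]
    conv_rhs => rw [pairSum.eq_def]
    by_cases h : 0 ≤ l2 ∧ l1 < (n : Int)
    · rw [dif_pos h, dif_pos h, hget l1 (by omega) h.2,
        hget l2 h.1 (by omega),
        ih (l2 - 1 + 1).toNat (by omega) (l1 + 1) (l2 - 1) rfl (by omega) hget]
    · rw [dif_neg h, dif_neg h]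

lemma pairSum_eq (get : Int → List Char) (n i : Nat) :
    ∀ j : Nat, pairSum get n ((i : Int) + 1 + (j : Int)) ((i : Int) - (j : Int))
      = ((List.range (min (i + 1) (n - 1 - i) - j)).map
          (fun (k : Nat) => calcDiff (get ((i : Int) + 1 + (j : Int) + (k : Int)))
                             (get ((i : Int) - (j : Int) - (k : Int))))).sum := by
  intro j
  generalize hc : min (i + 1) (n - 1 - i) - j = c
  induction c generalizing j with
  | zero =>
    rw [pairSum.eq_def, dif_neg (by omega)]
    simp
  | succ c ih =>
    rw [pairSum.eq_def, dif_pos (by constructor <;> omega), List.range_succ_eq_map]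
    have h1 : (i : Int) + 1 + (j : Int) + 1 = (i : Int) + 1 + ((j + 1 : Nat) : Int) := by
      push_cast; ring
    have h2 : (i : Int) - (j : Int) - 1 = (i : Int) - ((j + 1 : Nat) : Int) := by
      push_cast; ring
    rw [h1, h2, ih (j + 1) (by omega)]
    simp only [List.map_cons, List.sum_cons, List.map_map, Nat.cast_zero,
      Function.comp_def, Nat.succ_eq_add_one]
    congr 1
    · norm_num
    · refine congrArg List.sum (List.map_congr_left fun k _ => ?_)
      have e1 : ((i : Int) + 1 + (j : Int) + ((k + 1 : Nat) : Int))
          = (i : Int) + 1 + ((j + 1 : Nat) : Int) + (k : Int) := by push_cast; ring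
      have e2 : ((i : Int) - (j : Int) - ((k + 1 : Nat) : Int))
          = (i : Int) - ((j + 1 : Nat) : Int) - (k : Int) := by push_cast; ring
      rw [e1, e2]

lemma find?_congr_mem {α : Type} (l : List α) (p q : α → Bool)
    (h : ∀ x ∈ l, p x = q x) : l.find? p = l.find? q := by
  induction l with
  | nil => simp
  | cons a t ih =>
    rw [List.find?_cons, List.find?_cons, h a (List.mem_cons_self)]
    split
    · rfl
    · exact ih (fun x hx => h x (List.mem_cons_of_mem _ hx))

lemma aSearch_eq (get : Int → List Char) (n : Nat) (idxs : List Nat) :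
    aSearch get n idxs
      = (idxs.find? (fun (i : Nat) =>
            calcDiff (get (i : Int)) (get ((i : Int) + 1))
              + pairSum get n ((i : Int) + 2) ((i : Int) - 1) == 1)).map (fun (i : Nat) => i + 1) := by
  induction idxs with
  | nil => simp [aSearch]
  | cons i rest ih =>
    rw [List.find?_cons]
    simp only [aSearch]
    set d := calcDiff (get (i : Int)) (get ((i : Int) + 1)) with hd
    set P := pairSum get n ((i : Int) + 2) ((i : Int) - 1) with hP
    by_cases hpred : d + P = 1
    · have hd1 : d ≤ 1 := by omega
      have haw : aWhile get n ((i : Int) + 2) ((i : Int) - 1) (decide (d = 1)) = some true := by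
        rw [aWhile_some_true, ← hP]
        have : ((if decide (d = 1) then 1 else 0) : Nat) = d := by
          interval_cases d <;> simp
        omega
      rw [if_pos hd1, haw]
      simp [hpred]
    · have hne : (d + P == 1) = false := by simp [hpred]
      rw [hne]
      by_cases hd1 : d ≤ 1
      · rw [if_pos hd1]
        rcases haw : aWhile get n ((i : Int) + 2) ((i : Int) - 1) (decide (d = 1)) with _ | s
        · exact ih
        · cases s
          · simpa using ih
          · exfalso
            rw [aWhile_some_true, ← hP] at haw
            have : ((if decide (d = 1) then 1 else 0) : Nat) = d := by
              interval_cases d <;> simp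
            omega
      · rw [if_neg hd1]
        exact ih

lemma getD_map_toList (rows : List String) (k : Nat) :
    (rows.map String.toList).getD k [] = (rows.getD k "").toList := by
  induction rows generalizing k with
  | nil => simp
  | cons r t ih =>
    cases k with
    | zero => simp
    | succ m => simpa using ih m

lemma defects_eq (seqs : List (List Char)) (get : Int → List Char)
    (hget : ∀ j : Int, 0 ≤ j → j < (seqs.length : Int) → get j = seqs.getD j.toNat [])
    (i : Nat) (hi : i + 1 < seqs.length) :
    calcDiff (get (i : Int)) (get ((i : Int) + 1))
        + pairSum get seqs.length ((i : Int) + 2) ((i : Int) - 1)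
      = mirrorDefects seqs i := by
  have hps : pairSum get seqs.length ((i : Int) + 2) ((i : Int) - 1)
      = pairSum (fun j => seqs.getD j.toNat []) seqs.length ((i : Int) + 2) ((i : Int) - 1) :=
    pairSum_congr _ _ _ _ _ (by omega) hget
  have h2 : ((i : Int) + 2) = (i : Int) + 1 + ((1 : Nat) : Int) := by omega
  have h3 : ((i : Int) - 1) = (i : Int) - ((1 : Nat) : Int) := by omega
  rw [hps, h2, h3, pairSum_eq]
  unfold mirrorDefects
  obtain ⟨c, hc⟩ : ∃ c, min (i + 1) (seqs.length - 1 - i) = c + 1 :=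
    ⟨min (i + 1) (seqs.length - 1 - i) - 1, by omega⟩
  have hci : c ≤ i := by omega
  rw [hc, List.range_succ_eq_map]
  simp only [List.map_cons, List.sum_cons, List.map_map, Nat.add_sub_cancel,
    Function.comp_def, Nat.sub_zero, Nat.add_zero, Nat.succ_eq_add_one]
  congr 1
  · rw [hget (i : Int) (by omega) (by omega),
      hget ((i : Int) + 1) (by omega) (by omega), calcDiffB_eq]
    have e1 : ((i : Int)).toNat = i := by omega
    have e2 : ((i : Int) + 1).toNat = i + 1 := by omega
    rw [e1, e2]
  · refine congrArg List.sum (List.map_congr_left fun k hk => ?_)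
    rw [List.mem_range] at hk
    have hU : ((i : Int) + 1 + ((1 : Nat) : Int) + (k : Int)).toNat = i + 1 + (k + 1) := by
      omega
    have hL2 : ((i : Int) - ((1 : Nat) : Int) - (k : Int)).toNat = i - (k + 1) := by
      omega
    show calcDiff (seqs.getD ((i : Int) + 1 + ((1 : Nat) : Int) + (k : Int)).toNat [])
        (seqs.getD ((i : Int) - ((1 : Nat) : Int) - (k : Int)).toNat [])
      = calcDiffB (seqs.getD (i - (k + 1)) []) (seqs.getD (i + 1 + (k + 1)) [])
    rw [hU, hL2, calcDiffB_eq]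
    exact calcDiff_comm _ _

lemma aSearch_rows (rows : List String) :
    aSearch (fun j => (rows.getD j.toNat "").toList) rows.length
        (List.range (rows.length - 1))
      = findSplit (rows.map String.toList) := by
  rw [aSearch_eq, findSplit]
  have hlen : (rows.map String.toList).length = rows.length := by simp
  rw [hlen]
  refine congrArg (Option.map _) (find?_congr_mem _ _ _ fun i hi => ?_)
  rw [List.mem_range] at hi
  have hg : ∀ j : Int, 0 ≤ j → j < (((rows.map String.toList)).length : Int) →
      (fun j : Int => (rows.getD j.toNat "").toList) j
        = (rows.map String.toList).getD j.toNat [] := by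
    intro j _ _
    exact (getD_map_toList rows j.toNat).symm
  have hde := defects_eq (rows.map String.toList)
    (fun j => (rows.getD j.toNat "").toList) hg i (by simp only [List.length_map]; omega)
  rw [hlen] at hde
  rw [hde]

lemma length_colsOf (rows : List (List Char)) :
    (colsOf rows).length = (rows.headD []).length := by
  unfold colsOf; simp

lemma getD_colsOf (rows : List (List Char)) (k : Nat)
    (hk : k < (rows.headD []).length) :
    (colsOf rows).getD k [] = rows.map (fun x => x.getD k ' ') := by
  unfold colsOf
  rw [List.getD_eq_getElem _ _ (by simpa using hk)]
  simp

lemma aSearch_cols (g : List (List Char)) :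
    aSearch (fun j => g.map (fun x => x.getD j.toNat ' '))
        ((g.headD []).length)
        (List.range ((g.headD []).length - 1))
      = findSplit (colsOf g) := by
  have hlen : (colsOf g).length = (g.headD []).length := length_colsOf g
  rw [aSearch_eq, findSplit, hlen]
  refine congrArg (Option.map _) (find?_congr_mem _ _ _ fun i hi => ?_)
  rw [List.mem_range] at hi
  have hg : ∀ j : Int, 0 ≤ j → j < ((colsOf g).length : Int) →
      (fun j : Int => g.map (fun x => x.getD j.toNat ' ')) j
        = (colsOf g).getD j.toNat [] := by
    intro j h0 hj
    rw [getD_colsOf _ _ (by rw [← hlen]; omega)]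
  have hde := defects_eq (colsOf g)
    (fun j => g.map (fun x => x.getD j.toNat ' ')) hg i (by omega)
  rw [hlen] at hde
  rw [hde]

-- ---- B side: the pair-accumulation builds exactly the table of mirrorDefects ----

-- the per-cell contribution of one pair (r, s)
def cellVal (d : Nat → Nat → Nat) (i : Nat) (p : Nat × Nat) : Nat :=
  if (p.1 + p.2) % 2 = 1 ∧ (p.1 + p.2 - 1) / 2 = i then d p.1 p.2 else 0

lemma getD_modify_nat (l : List Nat) (j i : Nat) (f : Nat → Nat) (hj : j < l.length) :
    (l.modify j f).getD i 0 = if j = i then f (l.getD i 0) else l.getD i 0 := by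
  by_cases hi : i < l.length
  · rw [List.getD_eq_getElem _ _ (show i < (l.modify j f).length by simpa using hi),
      List.getElem_modify, List.getD_eq_getElem _ _ hi]
  · rw [List.getD_eq_getElem?_getD, List.getD_eq_getElem?_getD,
      List.getElem?_eq_none (by simpa using hi), List.getElem?_eq_none (by omega),
      if_neg (by omega)]

lemma foldl_modify_getD (d : Nat → Nat → Nat) (L : List (Nat × Nat)) (init : List Nat)
    (hidx : ∀ p ∈ L, (p.1 + p.2) % 2 = 1 → (p.1 + p.2 - 1) / 2 < init.length) (i : Nat) :
    (L.foldl (fun arr p =>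
        if (p.1 + p.2) % 2 = 1 then arr.modify ((p.1 + p.2 - 1) / 2) (· + d p.1 p.2)
        else arr) init).getD i 0
      = init.getD i 0 + (L.map (cellVal d i)).sum := by
  induction L generalizing init with
  | nil => simp
  | cons p L ih =>
    simp only [List.foldl_cons, List.map_cons, List.sum_cons]
    by_cases hc : (p.1 + p.2) % 2 = 1
    · rw [if_pos hc]
      have hlen : (init.modify ((p.1 + p.2 - 1) / 2) (· + d p.1 p.2)).length = init.length :=
        List.length_modify _ _ _
      have hm : (p.1 + p.2 - 1) / 2 < init.length := hidx p List.mem_cons_self hc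
      rw [ih _ (fun q hq hcq => by rw [hlen]; exact hidx q (List.mem_cons_of_mem _ hq) hcq),
        getD_modify_nat _ _ _ _ hm]
      by_cases hi : (p.1 + p.2 - 1) / 2 = i
      · rw [if_pos hi]
        simp only [cellVal, hc, hi]
        simp
        omega
      · rw [if_neg hi]
        simp only [cellVal, hc, hi]
        simp
    · rw [if_neg hc, ih _ (fun q hq hcq => hidx q (List.mem_cons_of_mem _ hq) hcq)]
      simp only [cellVal, hc]
      simp

-- summing the per-cell contribution of a single r over its s-range picks the lone mirror
-- partner 2i+1-r, if it lies in the range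
lemma sum_ite_unique (f : Nat → Nat) (t : Nat) :
    ∀ (c m : Nat), ((List.range' c m).map (fun s => if s = t then f s else 0)).sum
      = if c ≤ t ∧ t < c + m then f t else 0 := by
  intro c m
  induction m generalizing c with
  | zero => simp
  | succ m ih =>
    rw [List.range'_succ]
    simp only [List.map_cons, List.sum_cons, ih (c + 1)]
    by_cases hct : c = t
    · subst hct
      rw [if_pos rfl, if_neg (by omega), if_pos (by omega)]
      simp
    · rw [if_neg hct]
      by_cases h2 : c + 1 ≤ t ∧ t < c + 1 + m
      · rw [if_pos h2, if_pos (by omega)]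
        simp
      · rw [if_neg h2, if_neg (by omega)]

lemma inner_cell_sum (d : Nat → Nat → Nat) (i r n : Nat) :
    (((List.range' (r + 1) (n - (r + 1))).map (fun s => (r, s))).map (cellVal d i)).sum
      = if r ≤ i ∧ 2 * i + 1 < n + r then d r (2 * i + 1 - r) else 0 := by
  rw [List.map_map]
  have hcong : ∀ s ∈ List.range' (r + 1) (n - (r + 1)),
      (cellVal d i ∘ fun s => (r, s)) s = (fun s => if s = 2 * i + 1 - r then d r s else 0) s := by
    intro s hs
    rw [List.mem_range'_1] at hs
    simp only [Function.comp_apply, cellVal]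
    by_cases h : s = 2 * i + 1 - r
    · rw [if_pos h, if_pos (by omega)]
    · rw [if_neg h, if_neg (by omega)]
  rw [List.map_congr_left hcong, sum_ite_unique]
  by_cases hq : r ≤ i ∧ 2 * i + 1 < n + r
  · rw [if_pos (by omega), if_pos hq]
  · rw [if_neg (by omega), if_neg hq]

-- sum over a flatMap decomposes into a sum of inner sums
lemma sum_map_flatMap {α β : Type} (l : List α) (f : α → List β) (F : β → Nat) :
    (((l.flatMap f).map F).sum) = (l.map (fun x => ((f x).map F).sum)).sum := by
  induction l with
  | nil => simp
  | cons a l ih => simp [List.flatMap_cons, List.sum_append, ih]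

-- the reindexation at the heart of the equivalence: summing the lone-partner value over
-- all r < n equals A's outward mirrored sum around split i
lemma outer_sum_eq_mirrorSum (d : Nat → Nat → Nat) (n i : Nat) :
    ((List.range n).map (fun r => if r ≤ i ∧ 2 * i + 1 < n + r then d r (2 * i + 1 - r) else 0)).sum
      = ((List.range (min (i + 1) (n - 1 - i))).map (fun k => d (i - k) (i + 1 + k))).sum := by
  show (∑ r ∈ Finset.range n, if r ≤ i ∧ 2 * i + 1 < n + r then d r (2 * i + 1 - r) else 0)
      = ∑ k ∈ Finset.range (min (i + 1) (n - 1 - i)), d (i - k) (i + 1 + k)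
  rw [← Finset.sum_filter]
  refine Finset.sum_nbij' (fun r => i - r) (fun k => i - k) ?_ ?_ ?_ ?_ ?_
  · intro r hr
    beta_reduce
    simp only [Finset.mem_filter, Finset.mem_range] at hr ⊢
    omega
  · intro k hk
    beta_reduce
    simp only [Finset.mem_filter, Finset.mem_range] at hk ⊢
    omega
  · intro r hr
    beta_reduce
    simp only [Finset.mem_filter, Finset.mem_range] at hr
    omega
  · intro k hk
    beta_reduce
    simp only [Finset.mem_range] at hk
    omega
  · intro r hr
    beta_reduce
    simp only [Finset.mem_filter, Finset.mem_range] at hr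
    have h1 : i - (i - r) = r := by omega
    have h2 : i + 1 + (i - r) = 2 * i + 1 - r := by omega
    rw [h1, h2]

-- the flattened list of pairs the nested loops of pair_defects visit
def allPairs (n : Nat) : List (Nat × Nat) :=
  (List.range n).flatMap (fun r => (List.range' (r + 1) (n - (r + 1))).map (fun s => (r, s)))

lemma foldl_fun_congr {α β : Type} (f g : β → α → β) (h : ∀ b x, f b x = g b x) :
    ∀ (l : List α) (b : β), l.foldl f b = l.foldl g b := by
  intro l
  induction l with
  | nil => intro _; rfl
  | cons a t ih =>
    intro b
    rw [List.foldl_cons, List.foldl_cons, h b a]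
    exact ih _

lemma pairDefects_eq_foldl_allPairs (n : Nat) (d : Nat → Nat → Nat) :
    pairDefects n d
      = (allPairs n).foldl (fun arr p =>
          if (p.1 + p.2) % 2 = 1 then arr.modify ((p.1 + p.2 - 1) / 2) (· + d p.1 p.2)
          else arr) (List.replicate (n - 1) 0) := by
  unfold pairDefects allPairs
  rw [List.foldl_flatMap]
  refine foldl_fun_congr _ _ (fun arr r => ?_) _ _
  rw [List.foldl_map]

lemma getD_pairDefects (n : Nat) (d : Nat → Nat → Nat) (i : Nat) (hi : i < n - 1) :
    (pairDefects n d).getD i 0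
      = ((List.range (min (i + 1) (n - 1 - i))).map (fun k => d (i - k) (i + 1 + k))).sum := by
  rw [pairDefects_eq_foldl_allPairs,
    foldl_modify_getD d (allPairs n) _ (fun p hp hc => ?side) i]
  case side =>
    unfold allPairs at hp
    simp only [List.mem_flatMap, List.mem_map] at hp
    obtain ⟨r, hr, s, hs, rfl⟩ := hp
    rw [List.mem_range] at hr
    rw [List.mem_range'_1] at hs
    simp only [List.length_replicate]
    omega
  rw [List.getD_replicate 0 hi, Nat.zero_add]
  unfold allPairs
  rw [sum_map_flatMap]
  have hcong : ∀ r ∈ List.range n,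
      (fun r => (((List.range' (r + 1) (n - (r + 1))).map (fun s => (r, s))).map (cellVal d i)).sum) r
        = (fun r => if r ≤ i ∧ 2 * i + 1 < n + r then d r (2 * i + 1 - r) else 0) r := by
    intro r _
    exact inner_cell_sum d i r n
  rw [List.map_congr_left hcong, outer_sum_eq_mirrorSum]

lemma length_pairDefects (n : Nat) (d : Nat → Nat → Nat) :
    (pairDefects n d).length = n - 1 := by
  rw [pairDefects_eq_foldl_allPairs]
  generalize (List.replicate (n - 1) 0).length = m at *
  -- length is preserved by every step
  suffices h : ∀ (L : List (Nat × Nat)) (arr : List Nat),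
      (L.foldl (fun arr p =>
        if (p.1 + p.2) % 2 = 1 then arr.modify ((p.1 + p.2 - 1) / 2) (· + d p.1 p.2)
        else arr) arr).length = arr.length by
    rw [h]; simp
  intro L
  induction L with
  | nil => intro arr; rfl
  | cons p L ih =>
    intro arr
    simp only [List.foldl_cons]
    rw [ih]
    split
    · exact List.length_modify _ _ _
    · rfl

lemma firstOne_range'_map (f : Nat → Nat) :
    ∀ (m c : Nat), firstOne ((List.range' c m).map f) c
      = ((List.range' c m).find? (fun i => f i == 1)).map (· + 1) := by
  intro m
  induction m with
  | zero => intro c; simp [firstOne]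
  | succ m ih =>
    intro c
    rw [List.range'_succ]
    simp only [List.map_cons, firstOne, List.find?_cons]
    by_cases h : f c = 1
    · simp [h]
    · have hb : (f c == 1) = false := by simpa using h
      rw [if_neg h, hb]
      exact ih (c + 1)

lemma firstOne_pairDefects (n : Nat) (d : Nat → Nat → Nat) :
    firstOne (pairDefects n d) 0
      = ((List.range (n - 1)).find? (fun i =>
          ((List.range (min (i + 1) (n - 1 - i))).map (fun k => d (i - k) (i + 1 + k))).sum == 1)).map
          (· + 1) := by
  have harr : pairDefects n d = (List.range' 0 (n - 1)).map (fun i => (pairDefects n d).getD i 0) := by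
    refine List.ext_getElem (by simp [length_pairDefects]) (fun i h1 h2 => ?_)
    have hi : i < n - 1 := by simpa [length_pairDefects] using h1
    simp only [List.getElem_map, List.getElem_range']
    rw [List.getD_eq_getElem _ _ (by simp [length_pairDefects]; omega)]
    simp
  conv_lhs => rw [harr]
  rw [firstOne_range'_map]
  rw [← List.range_eq_range']
  refine congrArg (Option.map _) (find?_congr_mem _ _ _ fun i hi => ?_)
  rw [List.mem_range] at hi
  rw [getD_pairDefects n d i hi]

-- B's row-pass defect table search is findSplit of the rows
lemma bRows_eq (g : List (List Char)) :
    firstOne (pairDefects g.length (fun r s => countMismatch (g.getD r []) (g.getD s []))) 0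
      = findSplit g := by
  rw [firstOne_pairDefects, findSplit]
  refine congrArg (Option.map _) (find?_congr_mem _ _ _ fun i hi => ?_)
  rfl

-- B's column-pass defect table search is findSplit of the padded columns
lemma bCols_eq (g : List (List Char)) :
    firstOne (pairDefects (g.headD []).length
        (fun c1 c2 => (g.map (fun x => if x.getD c1 ' ' ≠ x.getD c2 ' ' then 1 else 0)).sum)) 0
      = findSplit (colsOf g) := by
  rw [firstOne_pairDefects, findSplit, length_colsOf]
  refine congrArg (Option.map _) (find?_congr_mem _ _ _ fun i hi => ?_)
  rw [List.mem_range] at hi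
  have hmd : mirrorDefects (colsOf g) i
      = ((List.range (min (i + 1) ((g.headD []).length - 1 - i))).map
          (fun k => (g.map (fun x => if x.getD (i - k) ' ' ≠ x.getD (i + 1 + k) ' ' then 1 else 0)).sum)).sum := by
    unfold mirrorDefects
    rw [length_colsOf]
    refine congrArg List.sum (List.map_congr_left fun k hk => ?_)
    rw [List.mem_range] at hk
    rw [getD_colsOf _ _ (by omega), getD_colsOf _ _ (by omega)]
    unfold calcDiffB
    rw [List.zip_map', List.map_map]
    rfl
  rw [hmd]

-- equality of the two per-pattern steps
lemma pattern_step (p : String) (s2 : Int) :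
    (match findMirror ((PySem.Str.split? p "\n").getD []) with
     | some (t, n) =>
       let s2' := if t = "row" then s2 + n * 100 else s2
       if t = "col" then s2' + n else s2'
     | none => s2)
    = (let g := ((PySem.Str.split? p "\n").getD []).map String.toList
       match firstOne (pairDefects g.length
           (fun r s => countMismatch (g.getD r []) (g.getD s []))) 0 with
       | some sc => s2 + 100 * (sc : Int)
       | none =>
         let w := (g.headD []).length
         match firstOne (pairDefects w
             (fun c1 c2 => (g.map (fun x => if x.getD c1 ' ' ≠ x.getD c2 ' ' then 1 else 0)).sum)) 0 with
         | some sc => s2 + (sc : Int)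
         | none => s2) := by
  set lines := (PySem.Str.split? p "\n").getD [] with hlines
  simp only [findMirror, bRows_eq, bCols_eq]
  rw [aSearch_rows]
  cases h1 : findSplit (lines.map String.toList) with
  | some r =>
    simp
    ring
  | none =>
    have hw : ((lines.map String.toList).headD []).length = (lines.headD "").length := by
      cases lines <;> simp
    have hget : (fun j : Int => lines.map (fun x => x.toList.getD j.toNat ' '))
        = (fun j : Int => (lines.map String.toList).map (fun x => x.getD j.toNat ' ')) := by
      funext j
      rw [List.map_map]
      rfl
    rw [hget, ← hw, aSearch_cols]
    cases h2 : findSplit (colsOf (lines.map String.toList)) with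
    | some r => simp
    | none => rfl

-- ===== VERDICT (by name: the statement is the Claim_ definition above) =====
theorem part2_spec : Claim_equal_part2 := by
  unfold Claim_equal_part2 Spec_part2
  intro patterns _ _
  unfold part2 part2_alt
  exact foldl_fun_congr _ _ (fun s p => pattern_step p s) patterns 0
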